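-- pv_equiv track=rewrite | github.com/RichR31/building-blocks-set | common/Judge.py | is_mono
-- ===== SOURCE A (Python) =====
-- def is_mono(word:list, letters:list)->int:
--     """
--     Checks if a given string is a mono word given a letter permutation. returns
--     the applicable color, or None if it's not possible.
--
--     Parameters
--     ----------
--     word:list
--         a list representing a word, each item is a letter in said word.
--         i.e ['s','l','o','g','a','n']
--
--     letters:list
--         a list containing letters, where every letter in the alphabet appears at least once
--
--     """
--     #TODO: think about he possibility of a word being able to be spelled within two different colors and how that can           affect the reward
--
--     #iterate through the six colors
--     for color in range(6):
--         #make a copy of the word since we don't want to modify the word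
--         word_copy = word.copy()
--
--         #loop through all the letters mapped to the current color
--         for i in range(color,len(letters),6):
--
--             #get the letter stored at the current index in the letters list
--             letter = letters[i]
--
--             #in the case that the current letter is present (at least once) in the copy of word list
--             if letter in word_copy:
--
--                 #remove the current letter from the copy of word
--                 word_copy.remove(letter)
--
--                 #check if the word has been completely spelled out
--                 #in order to terminate the method call
--                 if not word_copy:
--                     return color
--     return None
-- ===== SOURCE B (Python) =====
-- def is_mono(word: list, letters: list) -> int:
--     """Lowest color whose letter slots cover the word's letter counts (counting,
--     no copy-and-remove); returns None for the empty word or when no color fits."""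
--     if not word:
--         return None
--     need = {}
--     for l in word:
--         need[l] = need.get(l, 0) + 1
--     candidates = set(range(6))
--     for l, n in need.items():
--         candidates = {c for c in candidates
--                       if sum(1 if (x == l and i % 6 == c) else 0
--                              for i, x in enumerate(letters)) >= n}
--     return min(candidates) if candidates else None
-- ===== Notes on version B (the rewrite author's own statement) =====
-- stated objective: faster
-- what changed: Replaces A's per-color copy-and-remove simulation of spelling (membership test and list removal per slot) with a counting formulation: build the word's letter counts once, then shrink a candidate-color set over the word's distinct letters by comparing counts against each color's slot counts, returning the minimum surviving color.
import Mathlib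
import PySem

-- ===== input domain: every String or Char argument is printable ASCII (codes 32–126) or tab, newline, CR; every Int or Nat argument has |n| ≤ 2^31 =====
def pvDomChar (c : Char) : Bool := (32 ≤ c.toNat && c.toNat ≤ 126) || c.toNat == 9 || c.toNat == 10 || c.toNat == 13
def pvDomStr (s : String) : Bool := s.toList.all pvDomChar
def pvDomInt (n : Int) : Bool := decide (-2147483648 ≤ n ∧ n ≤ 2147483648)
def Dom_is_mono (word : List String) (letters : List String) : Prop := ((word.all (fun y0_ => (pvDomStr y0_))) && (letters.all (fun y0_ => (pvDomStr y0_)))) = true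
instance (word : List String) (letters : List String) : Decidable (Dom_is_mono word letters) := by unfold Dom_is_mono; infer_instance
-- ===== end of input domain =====

-- B replaces A's per-color copy-and-remove spelling simulation with a counting
-- formulation (shrinking candidate-color set over the word's distinct letters);
-- objective: faster (measured), same exact return value.

-- ===== PORT A =====
-- inner 'for i in range(color, len(letters), 6)' loop over word_copy; returns
-- true exactly when A's 'return color' fires. Indices produced by the range are
-- always in bounds, so pyGetD's default and the 'none' arm of remove? are dead.
def isMonoLoop (letters : List String) : List Int → List String → Bool
  | [], _ => false
  | i :: rest, wc =>
    let letter := PySem.List.pyGetD letters i ""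
    if wc.contains letter then
      match PySem.List.remove? wc letter with
      | some wc' => if wc' = [] then true else isMonoLoop letters rest wc'
      | none => false
    else isMonoLoop letters rest wc

-- outer 'for color in range(6)' loop
def isMonoColors (word letters : List String) : List Int → Option Int
  | [] => none
  | c :: rest =>
    if isMonoLoop letters (PySem.List.pyRange c (PySem.List.len letters) 6) word then some c
    else isMonoColors word letters rest

def is_mono (word : List String) (letters : List String) : Option Int :=
  isMonoColors word letters (PySem.List.pyRange 0 6 1)

-- ===== PORT B =====
-- Source B: letter counts of word, then shrink candidates per (letter, count) item;
-- 'min(candidates) if candidates else None' is exactly min? (none iff empty).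
def is_mono_alt (word : List String) (letters : List String) : Option Int :=
  if word = [] then none
  else
    let need : PySem.Dict String Int :=
      word.foldl (fun d l => d.insert l (d.getD l 0 + 1)) PySem.Dict.empty
    let candidates : PySem.Set Int :=
      need.items.foldl
        (fun cand p =>
          cand.filter (fun c =>
            decide (p.2 ≤ (List.map
              (fun q => if q.2 == p.1 && PySem.Int.mod q.1 6 == c then (1 : Int) else 0)
              (PySem.List.enumerate letters)).sum)))
        (PySem.Set.ofList (PySem.List.pyRange 0 6 1))
    PySem.List.min? candidates (fun c => c)

-- ===== PRECONDITION & SPEC =====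
def Spec_is_mono (word : List String) (letters : List String) (out : Option Int) : Prop := out = is_mono_alt word letters
instance (word : List String) (letters : List String) (out : Option Int) : Decidable (Spec_is_mono word letters out) := by unfold Spec_is_mono; infer_instance

-- ===== CLAIM (what is proved, stated in full; the proofs are below) =====
def Claim_equal_is_mono : Prop := ∀ (word : List String) (letters : List String), Dom_is_mono word letters → Spec_is_mono word letters (is_mono word letters)

-- ===== LEMMAS AND PROOFS =====

-- A's inner loop depends on the index list only through the letters it reads
def innerVals : List String → List String → Bool
  | [], _ => false
  | v :: vs, wc =>
    if wc.contains v then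
      let wc' := wc.erase v
      if wc' = [] then true else innerVals vs wc'
    else innerVals vs wc

theorem isMonoLoop_eq_innerVals (letters : List String) (idxs : List Int) (wc : List String) :
    isMonoLoop letters idxs wc = innerVals (idxs.map (fun i => PySem.List.pyGetD letters i "")) wc := by
  induction idxs generalizing wc with
  | nil => rfl
  | cons i rest ih =>
    simp only [isMonoLoop, innerVals, List.map]
    by_cases h : (PySem.List.pyGetD letters i "") ∈ wc
    · rw [PySem.List.remove?_eq_some_erase wc _ h]
      simp only [List.contains_iff_mem, h, if_true]
      split_ifs with h2
      · rfl
      · exact ih _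
    · simp only [List.contains_iff_mem, h, if_false]
      exact ih _

-- characterisation of A's copy-and-remove loop: it succeeds iff the word is
-- non-empty and the slot letters cover the word's letter counts
theorem innerVals_iff (vs : List String) : ∀ wc : List String,
    innerVals vs wc = true ↔ wc ≠ [] ∧ ∀ l, wc.count l ≤ vs.count l := by
  induction vs with
  | nil =>
    intro wc
    simp only [innerVals, List.count_nil]
    constructor
    · intro h; exact absurd h (by simp)
    · rintro ⟨hne, h⟩
      obtain ⟨x, t, rfl⟩ := List.exists_cons_of_ne_nil hne
      have := h x
      simp [List.count_cons_self] at this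
  | cons v vs ih =>
    intro wc
    simp only [innerVals]
    by_cases hv : v ∈ wc
    · simp only [List.contains_iff_mem, hv, if_true]
      by_cases hz : wc.erase v = []
      · simp only [hz, if_true, true_iff]
        have h2 := List.length_erase_of_mem hv
        rw [hz] at h2
        have h3 := List.length_pos_of_mem hv
        have h1 : wc.length = 1 := by simp at h2; omega
        obtain ⟨x, rfl⟩ := List.length_eq_one_iff.mp h1
        have hx : v = x := by simpa using hv
        subst hx
        refine ⟨by simp, fun l => ?_⟩
        rw [List.count_singleton, List.count_cons]
        split_ifs <;> omega
      · simp only [hz, if_false]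
        rw [ih]
        constructor
        · rintro ⟨_, h⟩
          refine ⟨fun h0 => by simp [h0] at hv, fun l => ?_⟩
          have := h l
          rw [List.count_erase] at this
          rw [List.count_cons]
          have hcv : 1 ≤ wc.count v := List.one_le_count_iff.mpr hv
          by_cases hl : v = l
          · subst hl; simp at this ⊢; omega
          · simp [hl] at this ⊢; omega
        · rintro ⟨_, h⟩
          refine ⟨hz, fun l => ?_⟩
          have := h l
          rw [List.count_erase]
          rw [List.count_cons] at this
          by_cases hl : v = l
          · subst hl; simp at this ⊢; omega
          · simp [hl] at this ⊢; omega
    · simp only [List.contains_iff_mem, hv, if_false]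
      rw [ih]
      have hcv : wc.count v = 0 := List.count_eq_zero.mpr hv
      constructor
      · rintro ⟨hne, h⟩
        refine ⟨hne, fun l => ?_⟩
        have := h l
        rw [List.count_cons]
        split_ifs <;> omega
      · rintro ⟨hne, h⟩
        refine ⟨hne, fun l => ?_⟩
        have := h l
        rw [List.count_cons] at this
        by_cases hvl : v = l
        · subst hvl; omega
        · simp [hvl] at this; exact this

-- range(c, n, 6) is the indices of range(n) congruent to c (for a color 0 ≤ c < 6)
theorem pyRange_six_eq_filter (c n : Int) (h0 : 0 ≤ c) (h6 : c < 6) :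
    PySem.List.pyRange c n 6 = (PySem.List.pyRange 0 n 1).filter (fun i => PySem.Int.mod i 6 == c) := by
  have hpw1 : (PySem.List.pyRange c n 6).Pairwise (· < ·) := by
    rw [PySem.List.pyRange_of_pos c n (by omega)]
    rw [List.pairwise_map]
    exact List.pairwise_lt_range.imp (by intro a b h; omega)
  have hpw2 : ((PySem.List.pyRange 0 n 1).filter (fun i => PySem.Int.mod i 6 == c)).Pairwise (· < ·) :=
    (PySem.List.pairwise_lt_pyRange_one 0 n).filter _
  refine List.Perm.eq_of_pairwise (le := (· < ·)) (fun a b _ _ hab hba => absurd hba (by omega)) hpw1 hpw2 ?_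
  rw [List.perm_ext_iff_of_nodup (hpw1.imp ne_of_lt) (hpw2.imp ne_of_lt)]
  intro x
  rw [List.mem_filter, PySem.List.mem_pyRange_iff_of_pos (by omega), PySem.List.mem_pyRange_one,
    PySem.Int.mod_eq_emod_of_pos (by omega)]
  constructor
  · rintro ⟨h1, h2, h3⟩
    refine ⟨⟨by omega, h2⟩, by simp; omega⟩
  · rintro ⟨⟨h1, h2⟩, h3⟩
    simp at h3
    refine ⟨by omega, h2, by omega⟩

-- the count A's loop sees at color c equals B's filtered-enumerate count
theorem slot_count_eq (letters : List String) (c : Int) (h0 : 0 ≤ c) (h6 : c < 6) (k : String) :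
    ((PySem.List.pyRange c (PySem.List.len letters) 6).map (fun i => PySem.List.pyGetD letters i "")).count k
      = (PySem.List.enumerate letters).countP (fun q => q.2 == k && PySem.Int.mod q.1 6 == c) := by
  rw [PySem.List.enumerate_eq_map_pyRange letters ""]
  rw [List.countP_map, pyRange_six_eq_filter c _ h0 h6, List.count_eq_countP, List.countP_map,
    List.countP_filter]
  rfl

-- A's outer loop is find? over the color list
theorem isMonoColors_eq_find? (word letters : List String) (cs : List Int) :
    isMonoColors word letters cs
      = cs.find? (fun c => isMonoLoop letters (PySem.List.pyRange c (PySem.List.len letters) 6) word) := by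
  induction cs with
  | nil => rfl
  | cons c rest ih =>
    simp only [isMonoColors]
    split_ifs with h
    · rw [List.find?_cons_of_pos (p := fun c => isMonoLoop letters (PySem.List.pyRange c (PySem.List.len letters) 6) word) h]
    · rw [List.find?_cons_of_neg (p := fun c => isMonoLoop letters (PySem.List.pyRange c (PySem.List.len letters) 6) word) h, ih]

-- B's fold of set-comprehension filters is one filter by the conjunction
theorem foldl_filter_eq_filter {α β : Type} (items : List α) (q : α → β → Bool) :
    ∀ init : List β,
      items.foldl (fun s p => s.filter (q p)) init
        = init.filter (fun c => decide (∀ p ∈ items, q p c = true)) := by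
  induction items with
  | nil => intro init; simp
  | cons p items ih =>
    intro init
    simp only [List.foldl_cons]
    rw [ih, List.filter_filter]
    apply List.filter_congr
    intro c _
    by_cases hp : q p c = true <;> by_cases hr : ∀ x ∈ items, q x c = true <;>
      simp [hp, hr]

-- min of a filtered strictly increasing list is its first satisfying element
theorem min?_filter_eq_find? (l : List Int) (hpw : l.Pairwise (· < ·)) (p : Int → Bool) :
    PySem.List.min? (l.filter p) (fun y => y) = l.find? p := by
  induction l with
  | nil => rfl
  | cons a t ih =>
    rw [List.pairwise_cons] at hpw
    by_cases hp : p a = true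
    · rw [List.filter_cons_of_pos hp, List.find?_cons_of_pos hp, PySem.List.min?_id_cons]
      congr 1
      rcases PySem.List.foldl_min_mem (t.filter p) a with h | h
      · exact h
      · have h1 := (PySem.List.foldl_min_le (t.filter p) a).1
        have h2 := hpw.1 _ (List.mem_of_mem_filter h)
        omega
    · rw [List.filter_cons_of_neg hp, List.find?_cons_of_neg hp]
      exact ih hpw.2

-- find? only looks at predicate values on members
theorem find?_congr_mem {α : Type} (l : List α) (p q : α → Bool)
    (h : ∀ x ∈ l, p x = q x) : l.find? p = l.find? q := by
  induction l with
  | nil => rfl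
  | cons a t ih =>
    simp only [List.find?]
    rw [h a (by simp)]
    cases hq : q a
    · exact ih (fun x hx => h x (by simp [hx]))
    · rfl

-- a single color's predicates agree (word non-empty)
theorem color_pred_eq (word letters : List String) (hw : word ≠ []) (c : Int) (h0 : 0 ≤ c) (h6 : c < 6) :
    isMonoLoop letters (PySem.List.pyRange c (PySem.List.len letters) 6) word
      = decide (∀ p ∈ (PySem.Dict.counter word).items,
          decide (p.2 ≤ (List.map
            (fun q => if q.2 == p.1 && PySem.Int.mod q.1 6 == c then (1 : Int) else 0)
            (PySem.List.enumerate letters)).sum) = true) := by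
  rw [isMonoLoop_eq_innerVals]
  rw [Bool.eq_iff_iff, innerVals_iff, decide_eq_true_iff]
  rw [PySem.Dict.items_counter]
  constructor
  · rintro ⟨-, h⟩
    intro p hp
    rw [List.mem_map] at hp
    obtain ⟨k, hk, rfl⟩ := hp
    rw [PySem.Set.mem_ofList] at hk
    rw [decide_eq_true_iff]
    dsimp only
    rw [PySem.List.sum_map_ite_one_zero (fun q : Int × String => q.2 == k && PySem.Int.mod q.1 6 == c)]
    have hh := h k
    rw [slot_count_eq letters c h0 h6 k] at hh
    exact_mod_cast hh
  · intro h
    refine ⟨hw, fun l => ?_⟩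
    rw [slot_count_eq letters c h0 h6 l]
    by_cases hl : l ∈ word
    · have hh := h (l, (List.count l word : Int))
        (List.mem_map.mpr ⟨l, (PySem.Set.mem_ofList word l).mpr hl, rfl⟩)
      rw [decide_eq_true_iff] at hh
      dsimp only at hh
      rw [PySem.List.sum_map_ite_one_zero (fun q : Int × String => q.2 == l && PySem.Int.mod q.1 6 == c)] at hh
      exact_mod_cast hh
    · rw [List.count_eq_zero.mpr hl]
      omega

-- empty word: A's inner loop can never fire a return
theorem innerVals_nil (vs : List String) : innerVals vs [] = false := by
  cases h : innerVals vs []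
  · rfl
  · rw [innerVals_iff] at h
    exact absurd rfl h.1

-- ===== VERDICT (by name: the statement is the Claim_ definition above) =====
theorem is_mono_spec : Claim_equal_is_mono := by
  intro word letters _
  unfold Spec_is_mono is_mono is_mono_alt
  by_cases hw : word = []
  · subst hw
    rw [if_pos rfl, isMonoColors_eq_find?, List.find?_eq_none.mpr]
    intro c _
    rw [isMonoLoop_eq_innerVals, innerVals_nil]
    simp
  · rw [if_neg hw]
    rw [PySem.Dict.foldl_insert_getD_add_one_eq_counter]
    dsimp only
    rw [foldl_filter_eq_filter]
    have h06 : PySem.Set.ofList (PySem.List.pyRange 0 6 1) = [0, 1, 2, 3, 4, 5] := by decide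
    rw [h06]
    rw [min?_filter_eq_find? _ (by decide)]
    rw [isMonoColors_eq_find?]
    have hr : PySem.List.pyRange 0 6 1 = [0, 1, 2, 3, 4, 5] := by decide
    rw [hr]
    apply find?_congr_mem
    intro c hc
    have : c = 0 ∨ c = 1 ∨ c = 2 ∨ c = 3 ∨ c = 4 ∨ c = 5 := by simpa using hc
    rcases this with rfl | rfl | rfl | rfl | rfl | rfl <;>
      exact color_pred_eq word letters hw _ (by norm_num) (by norm_num)
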